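-- pv_equiv track=rewrite | github.com/NVIDIA/TensorRT | python/packaging/bindings_wheel/tensorrt/plugin/_autotune.py | _gen_onesided_combinations
-- ===== SOURCE A (Python) =====
-- import builtins
-- import copy
--
-- def _gen_onesided_combinations(io_variants):
--
--     # Algorithm:
--     # (1) Ignore independent variants and count the (max) number of dependent variants `mx_poly`
--     # (2) Compile initial list of #`mx_poly` combinations using the first option (option 0) for any independent variants
--     # (3) For each independent variant IO index, add combinations with that index replaced by option 1, 2, ...
--
--     combinations = []
--     mx_poly = 0  # This is the number of dependent variants
--
--     for io_variant in io_variants: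
--         io_variant_list = io_variant.split("|")
--
--         if len(io_variant_list) > 1:
--             if "*" in io_variant:
--                 raise ValueError(
--                     f"Type/Format '{io_variant}' contains both '|' and '*'"
--                 )
--             if mx_poly > 1:
--                 if mx_poly != len(io_variant_list):
--                     raise ValueError(
--                         f"Type/Format combinations {io_variants} contain illegal dependent lengths"
--                     )
--
--         mx_poly = builtins.max(mx_poly, len(io_variant_list))
--
--     for _ in range(mx_poly):
--         combinations.append([None] * len(io_variants))
--
--     for j, io_variant in enumerate(io_variants):
--         io_variant_list = io_variant.split("|")
--
--         if len(io_variant_list) == 1: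
--             if "*" in io_variant:
--                 io_variant_list = io_variant.split("*")
--             for i in range(len(combinations)):
--                 combinations[i][j] = io_variant_list[0]
--         else:
--             for k in range(len(io_variant_list)):
--                 combinations[k][j] = io_variant_list[k]
--
--     for j, io_variant in enumerate(io_variants):
--         new_combs = []
--         if "*" in io_variant:
--             io_variant_list = io_variant.split("*")
--             for k in range(1, len(io_variant_list)):
--                 for c in combinations:
--                     new_c = copy.deepcopy(c)
--                     new_c[j] = io_variant_list[k]
--                     new_combs.append(new_c)
--             combinations.extend(new_combs)
--
--     return combinations
-- ===== SOURCE B (Python) =====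
-- import itertools
--
-- def _gen_onesided_combinations(io_variants):
--     # Validation pass: same errors as the original, computes mx_poly (the dependent-variant count).
--     mx_poly = 0
--     for io_variant in io_variants:
--         io_variant_list = io_variant.split("|")
--         if len(io_variant_list) > 1:
--             if "*" in io_variant:
--                 raise ValueError(
--                     f"Type/Format '{io_variant}' contains both '|' and '*'"
--                 )
--             if mx_poly > 1 and mx_poly != len(io_variant_list):
--                 raise ValueError(
--                     f"Type/Format combinations {io_variants} contain illegal dependent lengths"
--                 )
--         mx_poly = max(mx_poly, len(io_variant_list))
--
--     # Base rows: row k takes option k of every '|' column, option 0 of every other column.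
--     base = []
--     for k in range(mx_poly):
--         row = []
--         for io_variant in io_variants:
--             parts = io_variant.split("|")
--             if len(parts) == 1:
--                 if "*" in io_variant:
--                     row.append(io_variant.split("*")[0])
--                 else:
--                     row.append(parts[0])
--             else:
--                 row.append(parts[k])
--         base.append(row)
--
--     # '*' columns with their full option lists.
--     star_cols = [(j, io_variant.split("*")) for j, io_variant in enumerate(io_variants)
--                  if len(io_variant.split("|")) == 1 and "*" in io_variant]
--
--     # Single product expansion: later '*' columns vary slowest, base rows fastest.
--     out = []
--     for choice in itertools.product(*[range(len(opts)) for _, opts in reversed(star_cols)]):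
--         ks = tuple(reversed(choice))
--         for row in base:
--             new_row = list(row)
--             for (j, opts), k in zip(star_cols, ks):
--                 new_row[j] = opts[k]
--             out.append(new_row)
--     return out
-- ===== Notes on version B (the rewrite author's own statement) =====
-- stated objective: simpler
-- what changed: Replaces the incremental deepcopy/extend doubling loop over '*' columns by building the base rows once and expanding them in a single itertools.product pass over the '*' option lists (later '*' columns vary slowest, matching the original order).
import Mathlib
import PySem

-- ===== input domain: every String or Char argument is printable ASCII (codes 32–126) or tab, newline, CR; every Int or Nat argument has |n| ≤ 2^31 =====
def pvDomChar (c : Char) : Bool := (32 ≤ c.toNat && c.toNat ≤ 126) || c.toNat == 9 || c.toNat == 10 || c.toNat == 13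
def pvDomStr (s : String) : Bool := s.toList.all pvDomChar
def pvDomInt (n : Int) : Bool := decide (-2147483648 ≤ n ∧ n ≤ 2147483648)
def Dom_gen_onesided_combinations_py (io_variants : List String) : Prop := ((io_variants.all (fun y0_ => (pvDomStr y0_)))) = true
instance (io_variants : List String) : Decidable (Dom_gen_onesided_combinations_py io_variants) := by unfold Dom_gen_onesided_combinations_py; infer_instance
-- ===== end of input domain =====

-- B replaces A's repeated deepcopy/extend doubling loop by building the base rows once and
-- expanding them in a single itertools.product pass over the '*' columns (objective: simpler decomposition).

-- s.split(sep) for the literal non-empty separators "|" and "*" (split? is none only for sep = "")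
def pvSplit (v sep : String) : List String := (PySem.Str.split? v sep).getD []

-- ===== PORT A =====
-- A's first loop: running max of split lengths; none = ValueError (both raise sites)
def pvAMx (io_variants : List String) : Option Nat :=
  (io_variants.foldlM (fun (mx_poly : Nat) io_variant =>
    let io_variant_list := pvSplit io_variant "|"
    if 1 < io_variant_list.length then
      if PySem.Str.isIn "*" io_variant then none
      else if 1 < mx_poly then
        if mx_poly ≠ io_variant_list.length then none
        else some (max mx_poly io_variant_list.length)
      else some (max mx_poly io_variant_list.length)
    else some (max mx_poly io_variant_list.length)) 0 : Option Nat)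

-- A's second loop body for column j: fill column j of every row
def pvAStep2 (combs : List (List String)) (j : Nat) (io_variant : String) : List (List String) :=
  let lst := pvSplit io_variant "|"
  if lst.length = 1 then
    let lst := if PySem.Str.isIn "*" io_variant then pvSplit io_variant "*" else lst
    (List.range combs.length).foldl (fun cs i => cs.set i ((cs.getD i []).set j (lst.getD 0 ""))) combs
  else
    (List.range lst.length).foldl (fun cs k => cs.set k ((cs.getD k []).set j (lst.getD k ""))) combs

-- A's third loop body for column j: extend with copies carrying option 1, 2, … at column j
def pvAStep3 (combs : List (List String)) (j : Nat) (io_variant : String) : List (List String) :=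
  if PySem.Str.isIn "*" io_variant then
    let lst := pvSplit io_variant "*"
    let new_combs := (List.range' 1 (lst.length - 1)).foldl
        (fun nc k => nc ++ combs.map (fun c => c.set j (lst.getD k ""))) []
    combs ++ new_combs
  else combs

-- port of A; the `none` branch is where the Python raises ValueError (outside Pre_).
-- The `None` placeholder is ported as "": on every non-raising input each cell is overwritten.
def gen_onesided_combinations_py (io_variants : List String) : List (List String) :=
  match pvAMx io_variants with
  | none => []
  | some mx_poly =>
    let combinations := List.replicate mx_poly (List.replicate io_variants.length "")
    let combinations := (PySem.List.enumerate io_variants).foldl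
        (fun combs jv => pvAStep2 combs jv.1.toNat jv.2) combinations
    (PySem.List.enumerate io_variants).foldl
        (fun combs jv => pvAStep3 combs jv.1.toNat jv.2) combinations

-- ===== PORT B =====
-- Source B's validation loop (same code as the original's first loop)
def pvBMx (io_variants : List String) : Option Nat :=
  (io_variants.foldlM (fun (mx_poly : Nat) io_variant =>
    let io_variant_list := pvSplit io_variant "|"
    if 1 < io_variant_list.length then
      if PySem.Str.isIn "*" io_variant then none
      else if 1 < mx_poly then
        if mx_poly ≠ io_variant_list.length then none
        else some (max mx_poly io_variant_list.length)
      else some (max mx_poly io_variant_list.length)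
    else some (max mx_poly io_variant_list.length)) 0 : Option Nat)

-- Source B's base-row cell for row k, column value v
def pvBCell (k : Nat) (io_variant : String) : String :=
  let parts := pvSplit io_variant "|"
  if parts.length = 1 then
    if PySem.Str.isIn "*" io_variant then (pvSplit io_variant "*").getD 0 ""
    else parts.getD 0 ""
  else parts.getD k ""

-- itertools.product over index ranges: first factor varies slowest
def pvProdIdx : List Nat → List (List Nat)
  | [] => [[]]
  | m :: ms => (List.range m).flatMap (fun k => (pvProdIdx ms).map (fun t => k :: t))

-- Source B's star_cols comprehension
def pvStarCols (io_variants : List String) : List (Nat × List String) :=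
  (PySem.List.enumerate io_variants).filterMap (fun jv =>
    if (pvSplit jv.2 "|").length = 1 ∧ PySem.Str.isIn "*" jv.2 then
      some (jv.1.toNat, pvSplit jv.2 "*")
    else none)

def gen_onesided_combinations_py_alt (io_variants : List String) : List (List String) :=
  match pvBMx io_variants with
  | none => []
  | some mx_poly =>
    let base := (List.range mx_poly).map (fun k => io_variants.map (pvBCell k))
    let star_cols := pvStarCols io_variants
    (pvProdIdx (star_cols.reverse.map (fun p => p.2.length))).flatMap (fun choice =>
      base.map (fun row =>
        (star_cols.zip choice.reverse).foldl (fun r pk => r.set pk.1.1 (pk.1.2.getD pk.2 "")) row))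

-- ===== PRECONDITION & SPEC =====
-- Pre_ excludes exactly the inputs where A raises ValueError: a variant mixing '|' with '*',
-- or two '|'-variants with different option counts.
def Pre_gen_onesided_combinations_py (io_variants : List String) : Prop :=
  (∀ v ∈ io_variants, 1 < (pvSplit v "|").length → PySem.Str.isIn "*" v = false) ∧
  (∀ v ∈ io_variants, ∀ w ∈ io_variants, 1 < (pvSplit v "|").length → 1 < (pvSplit w "|").length →
      (pvSplit v "|").length = (pvSplit w "|").length)
instance (io_variants : List String) : Decidable (Pre_gen_onesided_combinations_py io_variants) := by
  unfold Pre_gen_onesided_combinations_py; infer_instance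

def pvWitness_gen_onesided_combinations_py : List String := ["FP32|FP16", "a*b", "c|d", "x"]

def Spec_gen_onesided_combinations_py (io_variants : List String) (out : List (List String)) : Prop := out = gen_onesided_combinations_py_alt io_variants
instance (io_variants : List String) (out : List (List String)) : Decidable (Spec_gen_onesided_combinations_py io_variants out) := by unfold Spec_gen_onesided_combinations_py; infer_instance

-- ===== CLAIM (what is proved, stated in full; the proofs are below) =====
def Claim_equal_gen_onesided_combinations_py : Prop := ∀ (io_variants : List String), Dom_gen_onesided_combinations_py io_variants → Pre_gen_onesided_combinations_py io_variants → Spec_gen_onesided_combinations_py io_variants (gen_onesided_combinations_py io_variants)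

-- ===== LEMMAS AND PROOFS =====

theorem pvBMx_eq (io_variants : List String) : pvBMx io_variants = pvAMx io_variants := rfl

theorem pvSplitOn_go_ne (sep : List Char) (fuel : Nat) :
    ∀ (l cur : List Char) (acc : List (List Char)), PySem.Chars.splitOn.go sep fuel l cur acc ≠ [] := by
  induction fuel with
  | zero => intro l cur acc; simp [PySem.Chars.splitOn.go]
  | succ n ih =>
    intro l cur acc
    match l with
    | [] => simp [PySem.Chars.splitOn.go]
    | c :: rest =>
      rw [PySem.Chars.splitOn.go]
      split
      · exact ih _ _ _
      · exact ih _ _ _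

theorem pvSplit_ne_nil (v : String) (sep : String) (hsep : sep.toList ≠ []) : pvSplit v sep ≠ [] := by
  have h := PySem.Str.split?_map v sep
  unfold pvSplit
  cases hs : PySem.Str.split? v sep with
  | none =>
    rw [hs] at h
    rw [PySem.Chars.split?] at h
    simp [List.isEmpty_iff, hsep] at h
  | some l =>
    rw [hs, PySem.Chars.split?] at h
    simp only [List.isEmpty_iff, hsep, Option.map_some] at h
    intro hl
    subst hl
    simp at h
    rw [PySem.Chars.splitOn] at h
    exact pvSplitOn_go_ne _ _ _ _ _ h

theorem pvProdIdx_append_singleton (ms : List Nat) (m : Nat) :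
    pvProdIdx (ms ++ [m]) = (pvProdIdx ms).flatMap (fun t => (List.range m).map (fun k => t ++ [k])) := by
  induction ms with
  | nil =>
    simp only [List.nil_append, pvProdIdx]
    simp only [List.flatMap_singleton]
    exact (List.map_eq_flatMap).symm
  | cons m0 ms ih =>
    simp only [List.cons_append, pvProdIdx, ih, List.flatMap_assoc, List.flatMap_map, List.map_flatMap, List.map_map]
    simp only [Function.comp_def]

def pvNatEnum (vs : List String) (s : Nat) : List (Nat × String) :=
  (PySem.List.enumerate vs (s : Int)).map (fun p => (p.1.toNat, p.2))

theorem pvNatEnum_cons (v : String) (vs : List String) (s : Nat) :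
    pvNatEnum (v :: vs) s = (s, v) :: pvNatEnum vs (s + 1) := by
  unfold pvNatEnum
  rw [PySem.List.enumerate_cons]
  have : ((s : Int) + 1) = ((s + 1 : Nat) : Int) := by push_cast; ring
  rw [List.map_cons, this]
  simp

theorem pvMapIdx_range_map {α β : Type} (F : Nat → α) (g : Nat → α → β) (m : Nat) :
    ((List.range m).map F).mapIdx g = (List.range m).map (fun k => g k (F k)) := by
  apply List.ext_getElem
  · simp
  · intro i h1 h2
    simp [List.getElem_mapIdx]

theorem pvFoldl_set_range {α : Type} (d : α) (g : Nat → α → α) (l : List α) (m : Nat) :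
    (List.range m).foldl (fun cs i => cs.set i (g i (cs.getD i d))) l
      = l.mapIdx (fun i x => if i < m then g i x else x) := by
  induction m with
  | zero =>
    simp only [List.range_zero, List.foldl_nil]
    apply List.ext_getElem <;> simp
  | succ m ih =>
    rw [List.range_succ, List.foldl_append, ih]
    simp only [List.foldl_cons, List.foldl_nil]
    apply List.ext_getElem
    · simp
    · intro i h1 h2
      simp only [List.length_set, List.length_mapIdx] at h1 h2
      by_cases him : i = m
      · subst him
        rw [List.getElem_set_self]
        have hl : i < l.length := by simpa using h2
        simp [List.getElem?_eq_getElem hl, List.getElem_mapIdx]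
      · rw [List.getElem_set_ne (by omega)]
        simp only [List.getElem_mapIdx]
        by_cases hlt : i < m
        · rw [if_pos hlt, if_pos (by omega)]
        · rw [if_neg hlt, if_neg (by omega)]

theorem pvAMx_no_mix (io_variants : List String) :
    ∀ (a : Nat) (mx : Nat), io_variants.foldlM (fun (mx_poly : Nat) io_variant =>
        let io_variant_list := pvSplit io_variant "|"
        if 1 < io_variant_list.length then
          if PySem.Str.isIn "*" io_variant then none
          else if 1 < mx_poly then
            if mx_poly ≠ io_variant_list.length then none
            else some (max mx_poly io_variant_list.length)
          else some (max mx_poly io_variant_list.length)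
        else some (max mx_poly io_variant_list.length)) a = some mx →
    ∀ v ∈ io_variants, 1 < (pvSplit v "|").length → PySem.Str.isIn "*" v = false := by
  induction io_variants with
  | nil => simp
  | cons u io ih =>
    intro a mx h v hv hlen
    rw [List.foldlM_cons] at h
    rcases List.mem_cons.mp hv with rfl | hv
    · by_contra hstar
      have hstar' : PySem.Str.isIn "*" v = true := by
        revert hstar; cases (PySem.Str.isIn "*" v) <;> simp
      simp only [PySem.Str.isIn, show "*".toList = ['*'] from rfl] at hstar'
      simp [hlen, hstar'] at h
    · rcases Option.bind_eq_some_iff.mp h with ⟨a', _, htail⟩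
      exact ih a' mx htail v hv hlen

theorem pvStep2_step (mx : Nat) (v : String) (rest : Nat) (s : Nat) (pre : Nat → List String)
    (hpre : ∀ k, (pre k).length = s) :
    pvAStep2 ((List.range mx).map (fun k => pre k ++ List.replicate (rest + 1) "")) s v
      = (List.range mx).map (fun k => (pre k ++ [pvBCell k v]) ++ List.replicate rest "") := by
  unfold pvAStep2 pvBCell
  by_cases hl : (pvSplit v "|").length = 1
  · rw [if_pos hl]
    rw [pvFoldl_set_range ([] : List String)
      (fun _ row => row.set s ((if PySem.Str.isIn "*" v then pvSplit v "*" else pvSplit v "|").getD 0 ""))]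
    rw [List.length_map, List.length_range, pvMapIdx_range_map]
    apply List.map_congr_left
    intro k hk
    rw [List.mem_range] at hk
    rw [if_pos hk, if_pos hl]
    rw [List.replicate_succ, List.set_append_right _ _ (le_of_eq (hpre k)), hpre k]
    simp only [Nat.sub_self, List.set_cons_zero, List.append_assoc, List.cons_append, List.nil_append]
    congr 1
    simp only [List.getD_eq_getElem?_getD]
    split <;> rfl
  · rw [if_neg hl]
    rw [pvFoldl_set_range ([] : List String) (fun k row => row.set s ((pvSplit v "|").getD k ""))]
    rw [pvMapIdx_range_map]
    apply List.map_congr_left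
    intro k hk
    rw [if_neg hl]
    by_cases hk2 : k < (pvSplit v "|").length
    · rw [if_pos hk2]
      rw [List.replicate_succ, List.set_append_right _ _ (le_of_eq (hpre k)), hpre k]
      simp
    · rw [if_neg hk2]
      rw [List.getD_eq_default _ _ (by omega)]
      simp [List.replicate_succ]

theorem pvStep2_base (mx : Nat) (vs : List String) :
    ∀ (s : Nat) (pre : Nat → List String), (∀ k, (pre k).length = s) →
    (pvNatEnum vs s).foldl (fun combs p => pvAStep2 combs p.1 p.2)
        ((List.range mx).map (fun k => pre k ++ List.replicate vs.length ""))
      = (List.range mx).map (fun k => pre k ++ vs.map (pvBCell k)) := by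
  induction vs with
  | nil => intro s pre hpre; simp [pvNatEnum]
  | cons v vs ih =>
    intro s pre hpre
    rw [pvNatEnum_cons, List.foldl_cons]
    rw [show (v :: vs).length = vs.length + 1 from rfl]
    rw [pvStep2_step mx v vs.length s pre hpre]
    rw [ih (s + 1) (fun k => pre k ++ [pvBCell k v]) (by intro k; simp [hpre k])]
    simp

def pvStarOf (cols : List (Nat × String)) : List (Nat × List String) :=
  cols.filterMap (fun p =>
    if (pvSplit p.2 "|").length = 1 ∧ PySem.Str.isIn "*" p.2 then
      some (p.1, pvSplit p.2 "*")
    else none)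

theorem pvExp (cols : List (Nat × String)) :
    ∀ (combs : List (List String)),
    (∀ p ∈ cols, 1 < (pvSplit p.2 "|").length → PySem.Str.isIn "*" p.2 = false) →
    (pvStarOf cols).Pairwise (fun a b => a.1 < b.1) →
    (∀ q ∈ pvStarOf cols, ∀ r ∈ combs, r.set q.1 (q.2.getD 0 "") = r) →
    cols.foldl (fun combs p => pvAStep3 combs p.1 p.2) combs
      = (pvProdIdx ((pvStarOf cols).reverse.map (fun p => p.2.length))).flatMap (fun choice =>
          combs.map (fun row =>
            ((pvStarOf cols).zip choice.reverse).foldl (fun r pk => r.set pk.1.1 (pk.1.2.getD pk.2 "")) row)) := by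
  induction cols with
  | nil =>
    intro combs _ _ _
    simp [pvStarOf, pvProdIdx]
  | cons p cols ih =>
    intro combs hmix hpw hinv
    obtain ⟨j, v⟩ := p
    rw [List.foldl_cons]
    by_cases hstar : PySem.Str.isIn "*" v = true
    · -- star column
      have hne : pvSplit v "|" ≠ [] := pvSplit_ne_nil v "|" (by decide)
      have hlen1 : (pvSplit v "|").length = 1 := by
        have hnot : ¬ 1 < (pvSplit v "|").length := by
          intro hgt
          have := hmix (j, v) List.mem_cons_self hgt
          rw [hstar] at this; cases this
        have : (pvSplit v "|").length ≠ 0 := by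
          simpa [List.length_eq_zero_iff] using hne
        omega
      have hstarC : PySem.Chars.isIn ['*'] v.toList = true := by
        simpa [PySem.Str.isIn, show "*".toList = ['*'] from rfl] using hstar
      have hcons : pvStarOf ((j, v) :: cols) = (j, pvSplit v "*") :: pvStarOf cols := by
        simp [pvStarOf, hlen1, hstarC]
      set opts := pvSplit v "*" with hopts
      have hoptsne : opts ≠ [] := pvSplit_ne_nil v "*" (by decide)
      have hL : 1 ≤ opts.length := List.length_pos_iff.mpr hoptsne
      have hq : (j, opts) ∈ pvStarOf ((j, v) :: cols) := by rw [hcons]; exact List.mem_cons_self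
      have hjlt : ∀ q' ∈ pvStarOf cols, j < q'.1 := by
        have := hpw; rw [hcons] at this
        exact (List.pairwise_cons.mp this).1
      have hpw' : (pvStarOf cols).Pairwise (fun a b => a.1 < b.1) := by
        have := hpw; rw [hcons] at this
        exact (List.pairwise_cons.mp this).2
      -- A's step: append the k = 1 … L-1 copies
      have hstep : pvAStep3 combs j v
          = (List.range opts.length).flatMap (fun k => combs.map (fun c => c.set j (opts.getD k ""))) := by
        unfold pvAStep3
        rw [if_pos hstar]
        simp only [← hopts]
        rw [PySem.List.foldl_append_eq_flatMap]
        have hr : List.range opts.length = 0 :: List.range' 1 (opts.length - 1) := by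
          rw [List.range_eq_range']
          cases hO : opts.length with
          | zero => omega
          | succ l => simp [List.range'_succ]
        rw [hr, List.flatMap_cons]
        congr 1
        have : combs.map (fun c => c.set j (opts.getD 0 "")) = combs := by
          conv_rhs => rw [← List.map_id combs]
          apply List.map_congr_left
          intro r hr'
          exact hinv (j, opts) hq r hr'
        rw [this]
      rw [hstep]
      -- invariant for the extended list
      have hinv' : ∀ q' ∈ pvStarOf cols, ∀ r' ∈ (List.range opts.length).flatMap
          (fun k => combs.map (fun c => c.set j (opts.getD k ""))), r'.set q'.1 (q'.2.getD 0 "") = r' := by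
        intro q' hq' r' hr'
        rw [List.mem_flatMap] at hr'
        obtain ⟨k, _, hr'⟩ := hr'
        rw [List.mem_map] at hr'
        obtain ⟨r, hr, rfl⟩ := hr'
        have hne2 : q'.1 ≠ j := Nat.ne_of_gt (hjlt q' hq')
        rw [List.set_comm _ _ (fun h => hne2 h.symm), hinv q' (by rw [hcons]; exact List.mem_cons_of_mem _ hq') r hr]
      have hmix' : ∀ p ∈ cols, 1 < (pvSplit p.2 "|").length → PySem.Str.isIn "*" p.2 = false :=
        fun p hp => hmix p (List.mem_cons_of_mem _ hp)
      rw [ih _ hmix' hpw' hinv']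
      -- now pure reindexing
      rw [hcons]
      rw [show ((j, opts) :: pvStarOf cols).reverse = (pvStarOf cols).reverse ++ [(j, opts)] from by simp]
      rw [List.map_append]
      rw [show (List.map (fun p => p.2.length) [(j, opts)]) = [opts.length] from rfl]
      rw [pvProdIdx_append_singleton]
      rw [List.flatMap_assoc]
      congr 1
      funext t
      rw [List.flatMap_map]
      simp only [List.map_flatMap, List.map_map]
      congr 1
      funext k
      apply List.map_congr_left
      intro r hr
      simp only [Function.comp]
      rw [List.reverse_append, List.reverse_cons, List.reverse_nil, List.nil_append,
        List.singleton_append, List.zip_cons_cons, List.foldl_cons]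
    · -- not a star column: the step is the identity
      have hid : pvAStep3 combs j v = combs := by
        unfold pvAStep3
        rw [if_neg hstar]
      have hstarC : PySem.Chars.isIn ['*'] v.toList = false := by
        have := hstar
        simp only [PySem.Str.isIn, show "*".toList = ['*'] from rfl] at this
        exact Bool.not_eq_true _ ▸ (by simpa using this)
      have hcons : pvStarOf ((j, v) :: cols) = pvStarOf cols := by
        simp [pvStarOf, hstarC]
      rw [hid, hcons]
      exact ih combs (fun p hp => hmix p (List.mem_cons_of_mem _ hp)) (by rw [hcons] at hpw; exact hpw)
        (by rw [hcons] at hinv; exact hinv)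

theorem pvFoldl_enum {β : Type} (g : β → Nat → String → β) (b : β) (vs : List String) :
    (PySem.List.enumerate vs).foldl (fun acc jv => g acc jv.1.toNat jv.2) b
      = (pvNatEnum vs 0).foldl (fun acc p => g acc p.1 p.2) b := by
  unfold pvNatEnum
  rw [List.foldl_map]
  norm_num

theorem pvStarCols_eq (vs : List String) : pvStarCols vs = pvStarOf (pvNatEnum vs 0) := by
  unfold pvStarCols pvStarOf pvNatEnum
  rw [List.filterMap_map]
  norm_num
  rfl

theorem pvNatEnum_mem (vs : List String) (p : Nat × String) (hp : p ∈ pvNatEnum vs 0) :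
    ∃ (k : Nat) (h : k < vs.length), p = (k, vs[k]) := by
  unfold pvNatEnum at hp
  rw [List.mem_map] at hp
  obtain ⟨q, hq, rfl⟩ := hp
  rw [PySem.List.mem_enumerate_iff] at hq
  obtain ⟨k, hk, rfl⟩ := hq
  exact ⟨k, hk, by simp⟩

theorem pvNatEnum_pairwise (vs : List String) :
    (pvNatEnum vs 0).Pairwise (fun a b => a.1 < b.1) := by
  unfold pvNatEnum
  rw [List.pairwise_map]
  apply List.Pairwise.imp_of_mem _ (PySem.List.pairwise_lt_enumerate vs 0)
  intro a b ha hb hlt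
  rw [PySem.List.mem_enumerate_iff] at ha hb
  obtain ⟨k, _, rfl⟩ := ha
  obtain ⟨k', _, rfl⟩ := hb
  simp only [zero_add] at hlt ⊢
  omega

theorem pvAMx_go_some (io : List String)
    (P1 : ∀ v ∈ io, 1 < (pvSplit v "|").length → PySem.Str.isIn "*" v = false)
    (P2 : ∀ v ∈ io, ∀ w ∈ io, 1 < (pvSplit v "|").length → 1 < (pvSplit w "|").length →
        (pvSplit v "|").length = (pvSplit w "|").length) :
    ∀ a : Nat, (a ≤ 1 ∨ ∀ v ∈ io, 1 < (pvSplit v "|").length → a = (pvSplit v "|").length) →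
    ∃ mx, io.foldlM (fun (mx_poly : Nat) io_variant =>
        let io_variant_list := pvSplit io_variant "|"
        if 1 < io_variant_list.length then
          if PySem.Str.isIn "*" io_variant then none
          else if 1 < mx_poly then
            if mx_poly ≠ io_variant_list.length then none
            else some (max mx_poly io_variant_list.length)
          else some (max mx_poly io_variant_list.length)
        else some (max mx_poly io_variant_list.length)) a = some mx := by
  induction io with
  | nil => intro a _; exact ⟨a, rfl⟩
  | cons u t ih =>
    intro a hinv
    rw [List.foldlM_cons]
    have P1t : ∀ v ∈ t, 1 < (pvSplit v "|").length → PySem.Str.isIn "*" v = false :=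
      fun v hv => P1 v (List.mem_cons_of_mem _ hv)
    have P2t : ∀ v ∈ t, ∀ w ∈ t, 1 < (pvSplit v "|").length → 1 < (pvSplit w "|").length →
        (pvSplit v "|").length = (pvSplit w "|").length :=
      fun v hv w hw => P2 v (List.mem_cons_of_mem _ hv) w (List.mem_cons_of_mem _ hw)
    by_cases hu : 1 < (pvSplit u "|").length
    · have hstar := P1 u List.mem_cons_self hu
      have hstep : (let io_variant_list := pvSplit u "|"
          if 1 < io_variant_list.length then
            if PySem.Str.isIn "*" u then none
            else if 1 < a then
              if a ≠ io_variant_list.length then none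
              else some (max a io_variant_list.length)
            else some (max a io_variant_list.length)
          else some (max a io_variant_list.length)) = some (max a (pvSplit u "|").length) := by
        simp only [hu, if_pos, hstar, Bool.false_eq_true]
        rw [if_neg (by simp)]
        by_cases ha : 1 < a
        · rw [if_pos ha, if_neg (by
            intro hne
            rcases hinv with h1 | h2
            · omega
            · exact hne (h2 u List.mem_cons_self hu))]
        · rw [if_neg ha]
      rw [hstep]
      apply ih P1t P2t
      right
      intro v hv hlv
      have : (pvSplit u "|").length = (pvSplit v "|").length :=
        P2 u List.mem_cons_self v (List.mem_cons_of_mem _ hv) hu hlv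
      rcases hinv with h1 | h2
      · omega
      · have := h2 u List.mem_cons_self hu; omega
    · have hstep : (let io_variant_list := pvSplit u "|"
          if 1 < io_variant_list.length then
            if PySem.Str.isIn "*" u then none
            else if 1 < a then
              if a ≠ io_variant_list.length then none
              else some (max a io_variant_list.length)
            else some (max a io_variant_list.length)
          else some (max a io_variant_list.length)) = some (max a (pvSplit u "|").length) := by
        simp [hu]
      rw [hstep]
      apply ih P1t P2t
      rcases hinv with h1 | h2
      · left; omega
      · right; intro v hv hlv
        have := h2 v (List.mem_cons_of_mem _ hv) hlv
        omega

theorem main_eq (io_variants : List String)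
    (hpre : Pre_gen_onesided_combinations_py io_variants) :
    gen_onesided_combinations_py io_variants = gen_onesided_combinations_py_alt io_variants := by
  have hpre' := hpre
  unfold Pre_gen_onesided_combinations_py at hpre'
  obtain ⟨hp1, hp2⟩ := hpre'
  unfold gen_onesided_combinations_py gen_onesided_combinations_py_alt
  rw [pvBMx_eq]
  obtain ⟨mx, h0⟩ := pvAMx_go_some io_variants hp1 hp2 0 (Or.inl (by omega))
  have h : pvAMx io_variants = some mx := h0
  rw [h]
  simp only []
  -- A side: second loop builds the base
  rw [pvFoldl_enum (fun combs j v => pvAStep2 combs j v)]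
  have hbase := pvStep2_base mx io_variants 0 (fun _ => []) (fun _ => rfl)
  simp only [List.nil_append] at hbase
  have hinit : List.replicate mx (List.replicate io_variants.length "")
      = (List.range mx).map (fun _ => List.replicate io_variants.length "") := by
    rw [List.map_const', List.length_range]
  rw [hinit, hbase]
  -- A side: third loop is the product expansion
  rw [pvFoldl_enum (fun combs j v => pvAStep3 combs j v)]
  rw [pvStarCols_eq]
  apply pvExp (pvNatEnum io_variants 0)
  · intro p hp hlen
    obtain ⟨k, hk, rfl⟩ := pvNatEnum_mem _ _ hp
    exact pvAMx_no_mix io_variants 0 mx h _ (List.getElem_mem hk) hlen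
  · -- pairwise of star columns
    unfold pvStarOf
    rw [List.pairwise_filterMap]
    apply List.Pairwise.imp _ (pvNatEnum_pairwise io_variants)
    intro a b hab x hx y hy
    split at hx
    · cases hx
      split at hy
      · cases hy; exact hab
      · cases hy
    · cases hx
  · -- base rows already carry option 0 of every star column
    intro q hq r hr
    unfold pvStarOf at hq
    rw [List.mem_filterMap] at hq
    obtain ⟨a, ha, hga⟩ := hq
    obtain ⟨k, hk, rfl⟩ := pvNatEnum_mem _ _ ha
    rw [List.mem_map] at hr
    obtain ⟨m, _, rfl⟩ := hr
    split at hga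
    · rename_i hcond
      cases hga
      have hval : (pvSplit io_variants[k] "*").getD 0 ""
          = (io_variants.map (pvBCell m))[k]'(by simpa using hk) := by
        rw [List.getElem_map]
        unfold pvBCell
        simp only [hcond.1, hcond.2, if_pos]
      simp only [hval]
      exact List.set_getElem_self _
    · cases hga

-- ===== VERDICT (by name: the statement is the Claim_ definition above) =====
theorem gen_onesided_combinations_py_spec : Claim_equal_gen_onesided_combinations_py := by
  intro io_variants _ hpre
  unfold Spec_gen_onesided_combinations_py
  exact main_eq io_variants hpre
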